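-- pv_equiv track=rewrite | github.com/AlessandroCavaglia/NLP-2023 | Radicioni/es3.py | count_trigrams
-- ===== SOURCE A (Python) =====
-- def count_trigrams(tokens):
--     trigram_counts = {}
--     for i in range(len(tokens) - 2):
--         current_token = tokens[i]
--         next_token = tokens[i + 1]
--         next_next_token = tokens[i + 2]
--         if (current_token, next_token) not in trigram_counts:
--             trigram_counts[(current_token, next_token)] = {}
--         if next_next_token not in trigram_counts[(current_token, next_token)]:
--             trigram_counts[(current_token, next_token)][next_next_token] = 0
--         trigram_counts[(current_token, next_token)][next_next_token] += 1
--     return trigram_counts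
-- ===== SOURCE B (Python) =====
-- def count_trigrams(tokens):
--     flat = {}
--     for tri in zip(tokens, tokens[1:], tokens[2:]):
--         flat[tri] = flat.get(tri, 0) + 1
--     nested = {}
--     for (a, b, c), n in flat.items():
--         inner = nested.get((a, b), {})
--         inner[c] = n
--         nested[(a, b)] = inner
--     return nested
-- ===== Notes on version B (the rewrite author's own statement) =====
-- stated objective: alternative
-- what changed: Replaces A's single index loop with nested membership tests by two passes: a flat dict counting full trigram triples over zip(tokens, tokens[1:], tokens[2:]), then a second pass nesting that flat table's items by bigram prefix.
import Mathlib
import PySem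

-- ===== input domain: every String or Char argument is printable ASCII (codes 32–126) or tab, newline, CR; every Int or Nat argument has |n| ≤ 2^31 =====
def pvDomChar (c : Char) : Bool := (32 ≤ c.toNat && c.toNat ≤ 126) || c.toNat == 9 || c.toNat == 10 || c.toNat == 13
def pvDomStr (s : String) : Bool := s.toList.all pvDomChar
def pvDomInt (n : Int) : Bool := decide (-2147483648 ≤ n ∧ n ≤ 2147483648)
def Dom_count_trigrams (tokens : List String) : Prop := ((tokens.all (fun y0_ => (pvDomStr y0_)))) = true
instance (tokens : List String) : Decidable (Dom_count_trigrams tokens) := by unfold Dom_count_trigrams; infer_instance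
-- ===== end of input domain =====

-- B replaces A's single index loop by two passes — a flat trigram counter, then nesting its
-- items by bigram prefix — as an alternative decomposition (no speed claim).

-- ===== PORT A =====
def count_trigrams (tokens : List String) : List (String × String × List (String × Int)) :=
  let trigram_counts : PySem.Dict (String × String) (PySem.Dict String Int) :=
    (PySem.List.pyRange 0 (PySem.List.len tokens - 2) 1).foldl (fun d i =>
      let current_token := PySem.List.pyGetD tokens i ""
      let next_token := PySem.List.pyGetD tokens (i + 1) ""
      let next_next_token := PySem.List.pyGetD tokens (i + 2) ""
      let d1 := if d.contains (current_token, next_token) then d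
                else d.insert (current_token, next_token) PySem.Dict.empty
      let inner := d1.getD (current_token, next_token) PySem.Dict.empty
      let inner2 := if inner.contains next_next_token then inner
                    else inner.insert next_next_token 0
      d1.insert (current_token, next_token)
        (inner2.insert next_next_token (inner2.getD next_next_token 0 + 1)))
      PySem.Dict.empty
  trigram_counts.items.map (fun p => (p.1.1, p.1.2, p.2.items))

-- ===== PORT B =====
def count_trigrams_alt (tokens : List String) : List (String × String × List (String × Int)) :=
  let tris : List (String × String × String) :=
    tokens.zip ((PySem.List.slice tokens (some 1) none).zip (PySem.List.slice tokens (some 2) none))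
  let flat : PySem.Dict (String × String × String) Int :=
    tris.foldl (fun d tri => d.insert tri (d.getD tri 0 + 1)) PySem.Dict.empty
  let nested : PySem.Dict (String × String) (PySem.Dict String Int) :=
    flat.items.foldl (fun nd q =>
      let inner := nd.getD (q.1.1, q.1.2.1) PySem.Dict.empty
      nd.insert (q.1.1, q.1.2.1) (inner.insert q.1.2.2 q.2)) PySem.Dict.empty
  nested.items.map (fun p => (p.1.1, p.1.2, p.2.items))

-- ===== PRECONDITION & SPEC =====
def Spec_count_trigrams (tokens : List String) (out : List (String × String × List (String × Int))) : Prop := out = count_trigrams_alt tokens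
instance (tokens : List String) (out : List (String × String × List (String × Int))) : Decidable (Spec_count_trigrams tokens out) := by unfold Spec_count_trigrams; infer_instance

-- ===== CLAIM (what is proved, stated in full; the proofs are below) =====
def Claim_equal_count_trigrams : Prop := ∀ (tokens : List String), Dom_count_trigrams tokens → Spec_count_trigrams tokens (count_trigrams tokens)

-- ===== LEMMAS AND PROOFS =====

-- A's conditional-insert step collapses to a single insert of the updated inner dict.
lemma stepA_eq (d : PySem.Dict (String × String) (PySem.Dict String Int))
    (k : String × String) (c : String) :
    (let d1 := if d.contains k then d else d.insert k PySem.Dict.empty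
     let inner := d1.getD k PySem.Dict.empty
     let inner2 := if inner.contains c then inner else inner.insert c 0
     d1.insert k (inner2.insert c (inner2.getD c 0 + 1)))
    = d.insert k ((d.getD k PySem.Dict.empty).insert c
        ((d.getD k PySem.Dict.empty).getD c 0 + 1)) := by
  by_cases hk : d.contains k = true
  · simp only [hk, if_true]
    by_cases hc : (d.getD k PySem.Dict.empty).contains c = true
    · simp [hc]
    · simp only [Bool.not_eq_true] at hc
      simp [PySem.Dict.getD_insert_self, PySem.Dict.insert_insert_self,
            PySem.Dict.getD_of_not_contains, hc]
  · simp only [Bool.not_eq_true] at hk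
    simp [hk, PySem.Dict.getD_insert_self, PySem.Dict.insert_insert_self,
          PySem.Dict.getD_of_not_contains, PySem.Dict.contains_empty]

-- the index loop reads exactly the trigram list zip(tokens, tokens[1:], tokens[2:])
lemma triples_eq (tokens : List String) :
    (PySem.List.pyRange 0 (PySem.List.len tokens - 2) 1).map
      (fun i => (PySem.List.pyGetD tokens i "", PySem.List.pyGetD tokens (i + 1) "",
                 PySem.List.pyGetD tokens (i + 2) ""))
    = tokens.zip ((tokens.drop 1).zip (tokens.drop 2)) := by
  apply List.ext_getElem
  · simp [PySem.List.length_pyRange_one, PySem.List.len]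
    omega
  · intro k h1 h2
    have hk : k < tokens.length - 2 := by
      rw [List.length_map, PySem.List.length_pyRange_one] at h1
      simp [PySem.List.len] at h1
      omega
    simp only [List.getElem_map, PySem.List.getElem_pyRange_one, List.getElem_zip, List.getElem_drop]
    have e0 : (0 : Int) + (k : Int) = ((k : Nat) : Int) := by omega
    rw [e0]
    have g1 : ((k : Nat) : Int) + 1 = (((k + 1 : Nat)) : Int) := by push_cast; ring
    have g2 : ((k : Nat) : Int) + 2 = (((k + 2 : Nat)) : Int) := by push_cast; ring
    rw [g1, g2, PySem.List.pyGetD_natCast, PySem.List.pyGetD_natCast, PySem.List.pyGetD_natCast,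
        List.getD_eq_getElem _ _ (by omega), List.getD_eq_getElem _ _ (by omega),
        List.getD_eq_getElem _ _ (by omega)]
    refine Prod.ext rfl (Prod.ext ?_ ?_) <;> simp <;> congr 1 <;> omega

-- a fold of keyed inserts, read back at one key, is a fold over the matching elements
theorem getD_foldl_insert_key {β κ ν : Type} [BEq κ] [LawfulBEq κ]
    (l : List β) (key : β → κ) (d0 : ν) (f : β → ν → ν) (d : PySem.Dict κ ν) (p : κ) :
    (l.foldl (fun d x => d.insert (key x) (f x (d.getD (key x) d0))) d).getD p d0
    = (l.filter (fun x => key x == p)).foldl (fun v x => f x v) (d.getD p d0) := by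
  induction l generalizing d with
  | nil => rfl
  | cons x t ih =>
    simp only [List.foldl_cons, List.filter_cons]
    by_cases h : key x = p
    · subst h
      simp [ih, PySem.Dict.getD_insert_self]
    · have hb : (key x == p) = false := by simpa using h
      simp only [hb, Bool.false_eq_true, if_false, ih]
      rw [PySem.Dict.getD_insert_of_ne]
      exact Ne.symm h

-- appending one element to a set-build adds it at the end (if new)
theorem ofList_snoc {α : Type} [BEq α] (l : List α) (x : α) :
    PySem.Set.ofList (l ++ [x]) = PySem.Set.add (PySem.Set.ofList l) x := by
  simp [PySem.Set.ofList_eq_foldl, List.foldl_append]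


-- dedup of a projection of a dedup is dedup of the projection
theorem ofList_map_ofList {α β : Type} [BEq α] [LawfulBEq α] [BEq β] [LawfulBEq β]
    (l : List α) (f : α → β) :
    PySem.Set.ofList ((PySem.Set.ofList l).map f) = PySem.Set.ofList (l.map f) := by
  induction l using List.reverseRecOn with
  | nil => rfl
  | append_singleton t x ih =>
    rw [ofList_snoc, List.map_append, List.map_singleton, ofList_snoc]
    by_cases hx : x ∈ PySem.Set.ofList t
    · have hfx : f x ∈ PySem.Set.ofList (t.map f) := by
        rw [PySem.Set.mem_ofList]
        exact List.mem_map_of_mem ((PySem.Set.mem_ofList ..).mp hx)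
      have hc : PySem.Set.contains (PySem.Set.ofList t) x = true := (PySem.Set.contains_iff _ _).mpr hx
      have hfc : PySem.Set.contains (PySem.Set.ofList (t.map f)) (f x) = true :=
        (PySem.Set.contains_iff _ _).mpr hfx
      simp only [PySem.Set.add, hc, hfc, if_true]
      exact ih
    · have hc : PySem.Set.contains (PySem.Set.ofList t) x = false := by
        simpa [PySem.Set.contains_iff] using hx
      simp only [PySem.Set.add, hc, if_false, Bool.false_eq_true]
      rw [List.map_append, List.map_singleton, ofList_snoc, ih]
      rfl

-- first-occurrence dedup commutes with the suffix projection on a fixed bigram prefix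
theorem filter_proj_ofList (tris : List (String × String × String)) (p : String × String) :
    ((PySem.Set.ofList tris).filter (fun t => (t.1, t.2.1) == p)).map (fun t => t.2.2)
    = PySem.Set.ofList ((tris.filter (fun t => (t.1, t.2.1) == p)).map (fun t => t.2.2)) := by
  induction tris using List.reverseRecOn with
  | nil => rfl
  | append_singleton t x ih =>
    rw [ofList_snoc, List.filter_append, List.map_append]
    by_cases hp : (x.1, x.2.1) = p
    · have hfs : List.filter (fun t => (t.1, t.2.1) == p) [x] = [x] := by
        simp [show ((x.1, x.2.1) == p) = true by simpa using hp]
      rw [hfs]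
      by_cases hx : x ∈ PySem.Set.ofList t
      · have hc : PySem.Set.contains (PySem.Set.ofList t) x = true := (PySem.Set.contains_iff _ _).mpr hx
        have hfx : x.2.2 ∈ (t.filter (fun t => (t.1, t.2.1) == p)).map (fun t => t.2.2) :=
          List.mem_map_of_mem (List.mem_filter.mpr ⟨(PySem.Set.mem_ofList ..).mp hx, by simpa using hp⟩)
        have hcc : PySem.Set.contains (PySem.Set.ofList ((t.filter (fun t => (t.1, t.2.1) == p)).map (fun t => t.2.2))) x.2.2 = true :=
          (PySem.Set.contains_iff _ _).mpr ((PySem.Set.mem_ofList ..).mpr hfx)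
        rw [List.map_singleton, ofList_snoc]
        simp only [PySem.Set.add, hc, hcc, if_true]
        exact ih
      · have hc : PySem.Set.contains (PySem.Set.ofList t) x = false := by
          simpa [PySem.Set.contains_iff] using hx
        have hnf : x.2.2 ∉ (t.filter (fun t => (t.1, t.2.1) == p)).map (fun t => t.2.2) := by
          intro hmem
          rcases List.mem_map.mp hmem with ⟨y, hy, hyy⟩
          rcases List.mem_filter.mp hy with ⟨hyt, hyp⟩
          have hyp' : (y.1, y.2.1) = p := by simpa using hyp
          have hyx : y = x := by
            obtain ⟨a, b, c⟩ := y; obtain ⟨a', b', c'⟩ := x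
            simp [Prod.ext_iff] at hyp' hp hyy ⊢
            exact ⟨hyp'.1.trans hp.1.symm, hyp'.2.trans hp.2.symm, hyy⟩
          rw [hyx] at hyt
          exact hx ((PySem.Set.mem_ofList ..).mpr hyt)
        have hnc : PySem.Set.contains (PySem.Set.ofList ((t.filter (fun t => (t.1, t.2.1) == p)).map (fun t => t.2.2))) x.2.2 = false := by
          simpa [PySem.Set.contains_iff, PySem.Set.mem_ofList] using hnf
        rw [List.map_singleton, ofList_snoc]
        simp only [PySem.Set.add, hc, hnc, if_false, Bool.false_eq_true]
        rw [List.filter_append, List.map_append, hfs, List.map_singleton, ih]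
    · have hfs : List.filter (fun t => (t.1, t.2.1) == p) [x] = [] := by
        simp [show ¬((x.1, x.2.1) == p) = true by simpa using hp]
      rw [hfs, List.map_nil, List.append_nil]
      by_cases hx : x ∈ PySem.Set.ofList t
      · have hc : PySem.Set.contains (PySem.Set.ofList t) x = true := (PySem.Set.contains_iff _ _).mpr hx
        simp only [PySem.Set.add, hc, if_true]
        exact ih
      · have hc : PySem.Set.contains (PySem.Set.ofList t) x = false := by
          simpa [PySem.Set.contains_iff] using hx
        simp only [PySem.Set.add, hc, if_false, Bool.false_eq_true]
        rw [List.filter_append, List.map_append, hfs, List.map_nil, List.append_nil]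
        exact ih

-- counting a suffix among trigrams with a fixed bigram prefix counts the full trigram
theorem count_proj (tris : List (String × String × String)) (p : String × String) (c : String) :
    ((tris.filter (fun t => (t.1, t.2.1) == p)).map (fun t => t.2.2)).count c
    = tris.count (p.1, p.2, c) := by
  induction tris with
  | nil => rfl
  | cons x t ih =>
    rw [List.filter_cons, List.count_cons]
    by_cases hp : (x.1, x.2.1) = p
    · rw [if_pos (by simpa using hp), List.map_cons, List.count_cons, ih]
      obtain ⟨a, b, d⟩ := x
      simp [Prod.ext_iff] at hp ⊢
      by_cases hd : d = c <;> simp [hd, hp.1, hp.2]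
    · rw [if_neg (by simpa using hp), ih]
      have hne : x ≠ (p.1, p.2, c) := by
        intro h
        exact hp (by rw [h])
      simp [hne]

-- a dict with nodup keys is its keys paired with their values
theorem items_eq_keys_map {κ ν : Type} [BEq κ] [LawfulBEq κ]
    (d : PySem.Dict κ ν) (h : d.keys.Nodup) (d0 : ν) :
    d.items = d.keys.map (fun k => (k, d.getD k d0)) := by
  conv_lhs => rw [← List.map_id d.items]
  have hk : d.keys = d.items.map (·.1) := by simp only [PySem.Dict.keys]
  rw [hk, List.map_map]
  apply List.map_congr_left
  intro pr hpr
  have : d.getD pr.1 d0 = pr.2 := by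
    have hm : (pr.1, pr.2) ∈ d.items := by simpa using hpr
    exact PySem.Dict.getD_of_mem_items d hm h d0
  simp [Function.comp, this]


-- inner dict at prefix p on the B side equals the counter of suffixes on the A side
theorem inner_eq (tris : List (String × String × String)) (p : String × String) :
    (((PySem.Dict.counter tris).items.filter (fun q => (q.1.1, q.1.2.1) == p)).foldl
        (fun (v : PySem.Dict String Int) q => v.insert q.1.2.2 q.2) PySem.Dict.empty)
    = PySem.Dict.counter ((tris.filter (fun t => (t.1, t.2.1) == p)).map (fun t => t.2.2)) := by
  rw [PySem.Dict.items_counter]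
  rw [List.filter_map]
  have hpred : ((fun q : (String × String × String) × Int => (q.1.1, q.1.2.1) == p) ∘
      (fun k : String × String × String => (k, (tris.count k : Int))))
      = fun t => (t.1, t.2.1) == p := by funext t; rfl
  rw [hpred, List.foldl_map]
  apply PySem.Dict.ext
  rw [PySem.Dict.items_counter]
  rw [PySem.Dict.items_foldl_insert_fresh]
  · show ((PySem.Set.ofList tris).filter (fun t => (t.1, t.2.1) == p)).map
        (fun k => (k.2.2, (tris.count k : Int))) = _
    rw [← filter_proj_ofList, List.map_map]
    apply List.map_congr_left
    intro k hk
    have hkp : (k.1, k.2.1) = p := by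
      have := (List.mem_filter.mp hk).2
      simpa using this
    have : tris.count k = ((tris.filter (fun t => (t.1, t.2.1) == p)).map (fun t => t.2.2)).count k.2.2 := by
      rw [count_proj]
      congr 1
      obtain ⟨a, b, c⟩ := k
      simp [Prod.ext_iff] at hkp ⊢
      exact ⟨hkp.1, hkp.2⟩
    simp [this]
  · intro a _
    exact PySem.Dict.contains_empty ..
  · show (((PySem.Set.ofList tris).filter (fun t => (t.1, t.2.1) == p)).map (fun t => t.2.2)).Nodup
    rw [filter_proj_ofList]
    exact PySem.Set.nodup_ofList ..

theorem innerA (tris : List (String × String × String)) (p : String × String) :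
    (tris.filter (fun t => (t.1, t.2.1) == p)).foldl
      (fun (v : PySem.Dict String Int) t => v.insert t.2.2 (v.getD t.2.2 0 + 1)) PySem.Dict.empty
    = PySem.Dict.counter ((tris.filter (fun t => (t.1, t.2.1) == p)).map (fun t => t.2.2)) := by
  rw [← PySem.Dict.foldl_insert_getD_add_one_eq_counter, List.foldl_map]

theorem nest_eq (tris : List (String × String × String)) :
    ((tris.foldl (fun d tri => d.insert tri (d.getD tri 0 + 1)) PySem.Dict.empty).items.foldl
      (fun (nd : PySem.Dict (String × String) (PySem.Dict String Int)) q =>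
        nd.insert (q.1.1, q.1.2.1)
          ((nd.getD (q.1.1, q.1.2.1) PySem.Dict.empty).insert q.1.2.2 q.2)) PySem.Dict.empty)
    = tris.foldl (fun (d : PySem.Dict (String × String) (PySem.Dict String Int)) t =>
        d.insert (t.1, t.2.1) ((d.getD (t.1, t.2.1) PySem.Dict.empty).insert t.2.2
          ((d.getD (t.1, t.2.1) PySem.Dict.empty).getD t.2.2 0 + 1))) PySem.Dict.empty := by
  rw [PySem.Dict.foldl_insert_getD_add_one_eq_counter]
  have hndB : (((PySem.Dict.counter tris).items.foldl
      (fun (nd : PySem.Dict (String × String) (PySem.Dict String Int)) q =>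
        nd.insert (q.1.1, q.1.2.1)
          ((nd.getD (q.1.1, q.1.2.1) PySem.Dict.empty).insert q.1.2.2 q.2)) PySem.Dict.empty)).keys.Nodup := by
    exact PySem.Dict.nodup_keys_foldl_insert_key _ _ _ _ (by simp)
  have hndA : ((tris.foldl (fun (d : PySem.Dict (String × String) (PySem.Dict String Int)) t =>
        d.insert (t.1, t.2.1) ((d.getD (t.1, t.2.1) PySem.Dict.empty).insert t.2.2
          ((d.getD (t.1, t.2.1) PySem.Dict.empty).getD t.2.2 0 + 1))) PySem.Dict.empty)).keys.Nodup := by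
    exact PySem.Dict.nodup_keys_foldl_insert_key _ _ _ _ (by simp)
  apply PySem.Dict.ext
  have hkeys : (((PySem.Dict.counter tris).items.foldl
      (fun (nd : PySem.Dict (String × String) (PySem.Dict String Int)) q =>
        nd.insert (q.1.1, q.1.2.1)
          ((nd.getD (q.1.1, q.1.2.1) PySem.Dict.empty).insert q.1.2.2 q.2)) PySem.Dict.empty)).keys
      = ((tris.foldl (fun (d : PySem.Dict (String × String) (PySem.Dict String Int)) t =>
        d.insert (t.1, t.2.1) ((d.getD (t.1, t.2.1) PySem.Dict.empty).insert t.2.2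
          ((d.getD (t.1, t.2.1) PySem.Dict.empty).getD t.2.2 0 + 1))) PySem.Dict.empty)).keys := by
    rw [PySem.Dict.keys_foldl_insert_key, PySem.Dict.keys_foldl_insert_key]
    simp only [PySem.Dict.keys_empty]
    rw [PySem.Dict.items_counter, List.map_map]
    have h1 : ∀ xs : List (String × String), PySem.Set.update ([] : List (String × String)) xs = PySem.Set.ofList xs := by
      intro xs; rw [PySem.Set.ofList_eq_foldl]; rfl
    rw [h1, h1]
    have h2 : ((fun q : (String × String × String) × Int => (q.1.1, q.1.2.1)) ∘
        (fun k : String × String × String => (k, (tris.count k : Int))))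
        = fun t : String × String × String => (t.1, t.2.1) := by funext t; rfl
    rw [h2]
    exact ofList_map_ofList tris (fun t => (t.1, t.2.1))
  have hgd : ∀ p : String × String, (((PySem.Dict.counter tris).items.foldl
      (fun (nd : PySem.Dict (String × String) (PySem.Dict String Int)) q =>
        nd.insert (q.1.1, q.1.2.1)
          ((nd.getD (q.1.1, q.1.2.1) PySem.Dict.empty).insert q.1.2.2 q.2)) PySem.Dict.empty)).getD p PySem.Dict.empty
      = ((tris.foldl (fun (d : PySem.Dict (String × String) (PySem.Dict String Int)) t =>
        d.insert (t.1, t.2.1) ((d.getD (t.1, t.2.1) PySem.Dict.empty).insert t.2.2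
          ((d.getD (t.1, t.2.1) PySem.Dict.empty).getD t.2.2 0 + 1))) PySem.Dict.empty)).getD p PySem.Dict.empty := by
    intro p
    rw [getD_foldl_insert_key ((PySem.Dict.counter tris).items)
          (fun q => (q.1.1, q.1.2.1)) PySem.Dict.empty (fun q v => v.insert q.1.2.2 q.2),
        getD_foldl_insert_key tris (fun t => (t.1, t.2.1)) PySem.Dict.empty
          (fun t v => v.insert t.2.2 (v.getD t.2.2 0 + 1))]
    simp only [PySem.Dict.getD_empty]
    rw [innerA, inner_eq]
  have e1 := items_eq_keys_map _ hndB PySem.Dict.empty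
  have e2 := items_eq_keys_map _ hndA PySem.Dict.empty
  have e3 := List.map_congr_left (l := (List.foldl
      (fun (d : PySem.Dict (String × String) (PySem.Dict String Int)) t =>
        d.insert (t.1, t.2.1)
          ((d.getD (t.1, t.2.1) PySem.Dict.empty).insert t.2.2
            ((d.getD (t.1, t.2.1) PySem.Dict.empty).getD t.2.2 0 + 1)))
      PySem.Dict.empty tris).keys) (fun p _ => congrArg (Prod.mk p) (hgd p))
  rw [hkeys] at e1
  exact (e1.trans e3).trans e2.symm

-- ===== VERDICT (by name: the statement is the Claim_ definition above) =====
theorem count_trigrams_spec : Claim_equal_count_trigrams := by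
  intro tokens _
  unfold Spec_count_trigrams
  simp only [count_trigrams, count_trigrams_alt]
  have hslice1 : PySem.List.slice tokens (some 1) none = tokens.drop 1 := by
    simpa using PySem.List.slice_from_natCast tokens 1
  have hslice2 : PySem.List.slice tokens (some 2) none = tokens.drop 2 := by
    exact_mod_cast PySem.List.slice_from_natCast tokens 2
  rw [hslice1, hslice2, nest_eq]
  have hstep : (fun (d : PySem.Dict (String × String) (PySem.Dict String Int)) (i : Int) =>
      let current_token := PySem.List.pyGetD tokens i ""
      let next_token := PySem.List.pyGetD tokens (i + 1) ""
      let next_next_token := PySem.List.pyGetD tokens (i + 2) ""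
      let d1 := if d.contains (current_token, next_token) then d
                else d.insert (current_token, next_token) PySem.Dict.empty
      let inner := d1.getD (current_token, next_token) PySem.Dict.empty
      let inner2 := if inner.contains next_next_token then inner
                    else inner.insert next_next_token 0
      d1.insert (current_token, next_token)
        (inner2.insert next_next_token (inner2.getD next_next_token 0 + 1)))
      = (fun (d : PySem.Dict (String × String) (PySem.Dict String Int)) (i : Int) =>
        (fun (d : PySem.Dict (String × String) (PySem.Dict String Int))
             (t : String × String × String) =>
          d.insert (t.1, t.2.1) ((d.getD (t.1, t.2.1) PySem.Dict.empty).insert t.2.2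
            ((d.getD (t.1, t.2.1) PySem.Dict.empty).getD t.2.2 0 + 1))) d
        ((fun i => (PySem.List.pyGetD tokens i "", PySem.List.pyGetD tokens (i + 1) "",
          PySem.List.pyGetD tokens (i + 2) "")) i)) := by
    funext d i
    exact stepA_eq d (PySem.List.pyGetD tokens i "", PySem.List.pyGetD tokens (i + 1) "")
      (PySem.List.pyGetD tokens (i + 2) "")
  rw [hstep, ← triples_eq tokens, List.foldl_map]
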